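-- pv_equiv track=rewrite | github.com/itt3ch/labs | src/bfs_safe_way.py | safest_way
-- ===== SOURCE A (Python) =====
-- from collections import deque
--
-- def is_valid(x, y, matrix):
--     return 0 <= x < len(matrix) and 0 <= y < len(matrix[0]) and matrix[x][y] != 0
--
-- def bfs(x, y, matrix, checked):
--     queue = deque([(x, y, 0)])
--     while queue:
--         x, y, steps = queue.popleft()
--         if (x, y) in checked or not is_valid(x, y, matrix):
--             continue
--         if y == len(matrix[0]) - 1:
--             return steps + 1
--         checked.add((x, y))
--         for dx, dy in [(1, 0), (-1, 0), (0, 1), (0, -1)]: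
--             queue.append((x + dx, y + dy, steps + 1))
--     return float('inf')
--
-- def safest_way(matrix):
--     if not matrix or not matrix[0]:
--         return -1
--
--     min_steps = float('inf')
--     for i in range(len(matrix)):
--
--         if matrix[i][0] == 1:
--             min_steps = min(min_steps, bfs(i, 0, matrix, set()))
--
--     return min_steps if min_steps != float('inf') else -1
-- ===== SOURCE B (Python) =====
-- def safest_way(matrix):
--     if not matrix or not matrix[0]:
--         return -1
--     rows, cols = len(matrix), len(matrix[0])
--     frontier = [(i, 0) for i in range(rows) if matrix[i][0] == 1]
--     visited = set()
--     level = 0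
--     while frontier:
--         nxt = []
--         for x, y in frontier:
--             if (x, y) in visited:
--                 continue
--             if not (0 <= x < rows and 0 <= y < cols and matrix[x][y] != 0):
--                 continue
--             if y == cols - 1:
--                 return level + 1
--             visited.add((x, y))
--             nxt.extend([(x + 1, y), (x - 1, y), (x, y + 1), (x, y - 1)])
--         frontier = nxt
--         level += 1
--     return -1
-- ===== Notes on version B (the rewrite author's own statement) =====
-- stated objective: alternative
-- what changed: A runs a separate deque-based BFS (with a fresh visited set and per-node step counters) from every first-column cell equal to 1 and takes the minimum; B runs one multi-source level-order BFS seeded with all those start cells at once, traversing the grid once instead of once per start.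
-- outside the precondition, e.g. on safest_way([[1, 1], [0]]): A returns 2, B returns 2
import Mathlib
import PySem

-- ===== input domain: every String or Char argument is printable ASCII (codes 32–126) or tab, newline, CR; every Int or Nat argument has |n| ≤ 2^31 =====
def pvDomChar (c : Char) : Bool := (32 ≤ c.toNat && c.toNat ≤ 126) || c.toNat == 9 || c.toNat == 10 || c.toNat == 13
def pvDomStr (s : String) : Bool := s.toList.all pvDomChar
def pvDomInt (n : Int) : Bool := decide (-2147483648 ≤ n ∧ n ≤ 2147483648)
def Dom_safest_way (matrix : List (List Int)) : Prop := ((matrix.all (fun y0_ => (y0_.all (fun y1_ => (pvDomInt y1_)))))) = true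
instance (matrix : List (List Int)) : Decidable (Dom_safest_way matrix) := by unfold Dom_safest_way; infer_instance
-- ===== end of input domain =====

-- B replaces A's one-BFS-per-start-cell scan (fresh visited set each time) by a single multi-source
-- level-order BFS seeded with every first-column start at once (a different traversal of the same grid).

-- ===== PORT A =====
-- matrix[x][y] (both indices already range-checked by the callers' guards; exact under Pre_, where rows are long enough)
def pvCell2 (m : List (List Int)) (x y : Int) : Int :=
  PySem.List.pyGetD (PySem.List.pyGetD m x []) y 0

-- is_valid(x, y, matrix)
def pvIsValid (x y : Int) (m : List (List Int)) : Bool :=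
  decide (0 ≤ x ∧ x < (m.length : Int)) && decide (0 ≤ y ∧ y < (m.headI.length : Int)) &&
    (pvCell2 m x y != 0)

-- the while-loop of bfs(...): queue of (x, y, steps); none = float('inf'); fuel never runs out
-- (one unit per popped entry; at most 1 + 4·rows·cols entries are ever enqueued)
def pvBfsAux (m : List (List Int)) (fuel : Nat) (queue : List (Int × Int × Nat))
    (checked : PySem.Set (Int × Int)) : Option Nat :=
  match queue with
  | [] => none
  | (x, y, steps) :: rest =>
    match fuel with
    | 0 => none
    | fuel' + 1 =>
      if checked.contains (x, y) || !(pvIsValid x y m) then pvBfsAux m fuel' rest checked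
      else if y == (m.headI.length : Int) - 1 then some (steps + 1)
      else pvBfsAux m fuel'
        (rest ++ [(x + 1, y, steps + 1), (x - 1, y, steps + 1), (x, y + 1, steps + 1), (x, y - 1, steps + 1)])
        (checked.add (x, y))
  termination_by fuel

-- min(a, b) where none plays float('inf')
def pvOptMin (a b : Option Nat) : Option Nat :=
  match a, b with
  | none, b => b
  | some v, none => some v
  | some v, some w => some (min v w)

def safest_way (matrix : List (List Int)) : Int :=
  if matrix = [] ∨ matrix.headI = [] then -1
  else
    let minSteps := (List.range matrix.length).foldl
      (fun acc i =>
        if (matrix.getD i []).headI == 1 then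
          pvOptMin acc (pvBfsAux matrix (4 * matrix.length * matrix.headI.length + 3)
            [((i : Int), (0 : Int), 0)] PySem.Set.empty)
        else acc) none
    match minSteps with
    | none => -1
    | some s => (s : Int)

-- ===== PORT B =====
-- the inline reachability test of B: 0 <= x < rows and 0 <= y < cols and matrix[x][y] != 0
def pvOpenB (m : List (List Int)) (c : Int × Int) : Bool :=
  decide (0 ≤ c.1 ∧ c.1 < (m.length : Int)) && decide (0 ≤ c.2 ∧ c.2 < (m.headI.length : Int)) &&
    (pvCell2 m c.1 c.2 != 0)

-- the while/for loops of B: `front` is the unprocessed rest of the current frontier, `nxt` the next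
-- frontier being built; none = no route (-1); fuel counts level switches and never runs out
def pvBfsLevels (m : List (List Int)) (fuel : Nat) (front nxt : List (Int × Int))
    (visited : PySem.Set (Int × Int)) (level : Nat) : Option Nat :=
  match front with
  | (x, y) :: rest =>
    if visited.contains (x, y) then pvBfsLevels m fuel rest nxt visited level
    else if !(pvOpenB m (x, y)) then pvBfsLevels m fuel rest nxt visited level
    else if y == (m.headI.length : Int) - 1 then some (level + 1)
    else pvBfsLevels m fuel rest (nxt ++ [(x + 1, y), (x - 1, y), (x, y + 1), (x, y - 1)])
      (visited.add (x, y)) level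
  | [] =>
    match nxt with
    | [] => none
    | _ :: _ =>
      match fuel with
      | 0 => none
      | fuel' + 1 => pvBfsLevels m fuel' nxt [] visited (level + 1)
  termination_by (fuel, front)

def safest_way_alt (matrix : List (List Int)) : Int :=
  if matrix = [] ∨ matrix.headI = [] then -1
  else
    let starts := (List.range matrix.length).filterMap
      (fun i => if (matrix.getD i []).headI == 1 then some ((i : Int), (0 : Int)) else none)
    match pvBfsLevels matrix (matrix.length * matrix.headI.length + 2) starts [] PySem.Set.empty 0 with
    | none => -1
    | some s => (s : Int)

-- ===== PRECONDITION & SPEC =====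
-- Pre_ excludes ragged matrices (a row shorter than the first one, or an empty row) when the first
-- column contains a start: there Python A's unguarded matrix[x][y] may raise IndexError depending on
-- which cells the search visits (on some such inputs A happens to return before touching a short row).
def Pre_safest_way (matrix : List (List Int)) : Prop :=
  matrix.headI = [] ∨
    ((∀ row ∈ matrix, row ≠ []) ∧
      ((∀ row ∈ matrix, matrix.headI.length ≤ row.length) ∨ (∀ row ∈ matrix, row.headI ≠ 1)))
instance (matrix : List (List Int)) : Decidable (Pre_safest_way matrix) := by
  unfold Pre_safest_way; infer_instance

def pvWitness_safest_way : List (List Int) := [[1, 0, 1], [1, 1, 1]]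

def Spec_safest_way (matrix : List (List Int)) (out : Int) : Prop := out = safest_way_alt matrix
instance (matrix : List (List Int)) (out : Int) : Decidable (Spec_safest_way matrix out) := by
  unfold Spec_safest_way; infer_instance

-- ===== CLAIM (what is proved, stated in full; the proofs are below) =====
def Claim_equal_safest_way : Prop := ∀ (matrix : List (List Int)), Dom_safest_way matrix → Pre_safest_way matrix → Spec_safest_way matrix (safest_way matrix)

-- ===== LEMMAS AND PROOFS =====

-- the four grid neighbours, in both programs' enqueue order
def pvNbrs (v : Int × Int) : List (Int × Int) :=
  [(v.1 + 1, v.2), (v.1 - 1, v.2), (v.1, v.2 + 1), (v.1, v.2 - 1)]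

-- all in-range grid positions
def pvCells (m : List (List Int)) : List (Int × Int) :=
  ((List.range m.length) ×ˢ (List.range m.headI.length)).map (fun p => ((p.1 : Int), (p.2 : Int)))

-- number of grid positions not yet in C
def pvFree (m : List (List Int)) (C : PySem.Set (Int × Int)) : Nat :=
  ((pvCells m).filter (fun v => decide (v ∉ C))).length

-- cells reachable from a start in S in exactly n moves through open non-last-column cells
def pvReach (m : List (List Int)) (S : List (Int × Int)) : Nat → (Int × Int) → Prop
  | 0, v => v ∈ S
  | n + 1, v => ∃ u, pvReach m S n u ∧ pvOpenB m u = true ∧ u.2 ≠ (m.headI.length : Int) - 1 ∧ v ∈ pvNbrs u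

def pvHit (m : List (List Int)) (S : List (Int × Int)) (n : Nat) : Prop :=
  ∃ v, pvReach m S n v ∧ pvOpenB m v = true ∧ v.2 = (m.headI.length : Int) - 1

def pvAnswer (m : List (List Int)) (S : List (Int × Int)) (r : Option Nat) : Prop :=
  (r = none ∧ ∀ k, ¬ pvHit m S k) ∨
    (∃ N, r = some (N + 1) ∧ pvHit m S N ∧ ∀ k < N, ¬ pvHit m S k)

-- one whole frontier pass of B (proof-side mirror of the `for` loop); none = a hit was found
def pvProcess (m : List (List Int)) : List (Int × Int) → List (Int × Int) → PySem.Set (Int × Int) →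
    Option (List (Int × Int) × PySem.Set (Int × Int))
  | [], acc, C => some (acc, C)
  | v :: rest, acc, C =>
    if C.contains v then pvProcess m rest acc C
    else if !(pvOpenB m v) then pvProcess m rest acc C
    else if v.2 == (m.headI.length : Int) - 1 then none
    else pvProcess m rest (acc ++ pvNbrs v) (C.add v)

lemma pvCountP_lt (l : List (Int × Int)) (p q : (Int × Int) → Bool)
    (hpq : ∀ x, q x = true → p x = true) (v : Int × Int) (hv : v ∈ l)
    (hp : p v = true) (hq : q v = false) : l.countP q < l.countP p := by
  induction l with
  | nil => simp at hv
  | cons a l ih =>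
    rcases List.mem_cons.1 hv with rfl | hv'
    · have hmono : l.countP q ≤ l.countP p := List.countP_mono_left (fun x _ hx => hpq x hx)
      simp [hp, hq]
      omega
    · have := ih hv'
      by_cases hqa : q a = true
      · simp [hqa, hpq a hqa]; omega
      · simp only [List.countP_cons]
        have : (if q a = true then 1 else 0) ≤ (if p a = true then 1 else 0) := by
          split_ifs <;> omega
        omega

lemma pvMem_pvCells (m : List (List Int)) (v : Int × Int) :
    v ∈ pvCells m ↔ (0 ≤ v.1 ∧ v.1 < (m.length : Int) ∧ 0 ≤ v.2 ∧ v.2 < (m.headI.length : Int)) := by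
  unfold pvCells
  simp only [List.mem_map, List.mem_product, List.mem_range, Prod.exists]
  constructor
  · rintro ⟨a, b, ⟨ha, hb⟩, rfl⟩
    simp only
    omega
  · rintro ⟨h1, h2, h3, h4⟩
    refine ⟨v.1.toNat, v.2.toNat, ⟨by omega, by omega⟩, ?_⟩
    have e1 : ((v.1.toNat : Int)) = v.1 := Int.toNat_of_nonneg h1
    have e2 : ((v.2.toNat : Int)) = v.2 := Int.toNat_of_nonneg h3
    rw [e1, e2]

lemma pvOpen_mem_cells (m : List (List Int)) (v : Int × Int) (h : pvOpenB m v = true) :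
    v ∈ pvCells m := by
  unfold pvOpenB at h
  simp only [Bool.and_eq_true, decide_eq_true_eq] at h
  exact (pvMem_pvCells m v).2 ⟨h.1.1.1, h.1.1.2, h.1.2.1, h.1.2.2⟩

lemma pvFree_empty (m : List (List Int)) : pvFree m PySem.Set.empty = m.length * m.headI.length := by
  unfold pvFree
  have hall : ∀ v ∈ pvCells m, (decide (v ∉ (PySem.Set.empty : PySem.Set (Int × Int)))) = true := by
    intro v _
    simp [PySem.Set.empty]
  rw [List.filter_eq_self.2 hall]
  unfold pvCells
  simp [List.length_product]

lemma pvFree_lt (m : List (List Int)) (C C' : PySem.Set (Int × Int))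
    (hmono : ∀ w, w ∈ C → w ∈ C')
    (v : Int × Int) (hcell : v ∈ pvCells m) (hv : v ∉ C)
    (hv' : v ∈ C') : pvFree m C' < pvFree m C := by
  unfold pvFree
  rw [← List.countP_eq_length_filter, ← List.countP_eq_length_filter]
  refine pvCountP_lt _ _ _ ?_ v hcell (by simp [hv]) (by simp [hv'])
  intro x hx
  simp only [decide_eq_true_eq] at hx ⊢
  exact fun hxC => hx (hmono x hxC)

lemma pvFree_add_lt (m : List (List Int)) (C : PySem.Set (Int × Int)) (v : Int × Int)
    (hcell : v ∈ pvCells m) (hv : v ∉ C) :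
    pvFree m (C.add v) < pvFree m C := by
  refine pvFree_lt m C (C.add v) ?_ v hcell hv ?_
  · intro w hw; exact (PySem.Set.mem_add _ _ _).2 (Or.inl hw)
  · exact (PySem.Set.mem_add _ _ _).2 (Or.inr rfl)

-- the simulation: A's queue run over a two-level queue equals B's frontier run
lemma pvSim (m : List (List Int)) : ∀ n fA fB (F acc : List (Int × Int))
    (C : PySem.Set (Int × Int)) (s : Nat),
    fA + fB ≤ n →
    F.length + acc.length + 4 * pvFree m C + 2 ≤ fA →
    pvFree m C + 2 + (if acc = [] then 0 else 1) ≤ fB →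
    pvBfsAux m fA (F.map (fun v => (v.1, v.2, s)) ++ acc.map (fun v => (v.1, v.2, s + 1))) C
      = pvBfsLevels m fB F acc C s := by
  intro n
  induction n with
  | zero =>
    intro fA fB F acc C s hsum hA hB
    omega
  | succ n ih =>
    intro fA fB F acc C s hsum hA hB
    cases F with
    | nil =>
      cases acc with
      | nil => simp [pvBfsAux, pvBfsLevels]
      | cons a acc' =>
        obtain ⟨fB', rfl⟩ : ∃ fB', fB = fB' + 1 := ⟨fB - 1, by omega⟩
        rw [show pvBfsLevels m (fB' + 1) [] (a :: acc') C s
            = pvBfsLevels m fB' (a :: acc') [] C (s + 1) by simp [pvBfsLevels]]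
        have := ih fA fB' (a :: acc') [] C (s + 1) (by omega)
          (by simp at hA ⊢; omega) (by simp at hB ⊢; omega)
        simpa using this
    | cons v F' =>
      obtain ⟨x, y⟩ := v
      obtain ⟨fA', rfl⟩ : ∃ fA', fA = fA' + 1 := ⟨fA - 1, by simp at hA; omega⟩
      have hob : pvOpenB m (x, y) = pvIsValid x y m := rfl
      by_cases h1 : (x, y) ∈ C
      · rw [show pvBfsLevels m fB ((x, y) :: F') acc C s = pvBfsLevels m fB F' acc C s by
            simp [pvBfsLevels, h1]]
        have := ih fA' fB F' acc C s (by omega) (by simp at hA ⊢; omega) hB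
        rw [← this]
        simp [pvBfsAux, h1]
      · by_cases h2 : pvIsValid x y m = true
        · by_cases h3 : (y == (m.headI.length : Int) - 1) = true
          · rw [show pvBfsLevels m fB ((x, y) :: F') acc C s = some (s + 1) by
              simp [pvBfsLevels, h1, hob, h2, h3]]
            simp [pvBfsAux, h1, h2, h3]
          · rw [show pvBfsLevels m fB ((x, y) :: F') acc C s
                = pvBfsLevels m fB F' (acc ++ pvNbrs (x, y)) (C.add (x, y)) s by
              simp [pvBfsLevels, h1, hob, h2, h3, pvNbrs]]
            have hcell : (x, y) ∈ pvCells m := pvOpen_mem_cells m (x, y) (hob.trans h2)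
            have hlt : pvFree m (C.add (x, y)) < pvFree m C := pvFree_add_lt m C (x, y) hcell h1
            have hB2 : pvFree m C + 2 ≤ fB := by split_ifs at hB <;> omega
            have := ih fA' fB F' (acc ++ pvNbrs (x, y)) (C.add (x, y)) s (by omega)
              (by simp [pvNbrs] at hA ⊢; omega)
              (by
                rw [show (if acc ++ pvNbrs (x, y) = [] then 0 else 1) = 1 by simp [pvNbrs]]
                omega)
            rw [← this]
            rw [show pvBfsAux m (fA' + 1)
                (((x, y) :: F').map (fun v => (v.1, v.2, s)) ++ acc.map (fun v => (v.1, v.2, s + 1))) C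
              = pvBfsAux m fA'
                ((F'.map (fun v => (v.1, v.2, s)) ++ acc.map (fun v => (v.1, v.2, s + 1)))
                  ++ [(x + 1, y, s + 1), (x - 1, y, s + 1), (x, y + 1, s + 1), (x, y - 1, s + 1)])
                (C.add (x, y)) by simp [pvBfsAux, h1, h2, h3]]
            congr 1
            simp [pvNbrs]
        · rw [show pvBfsLevels m fB ((x, y) :: F') acc C s = pvBfsLevels m fB F' acc C s by
              simp [pvBfsLevels, h1, hob, h2]]
          have := ih fA' fB F' acc C s (by omega) (by simp at hA ⊢; omega) hB
          rw [← this]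
          simp [pvBfsAux, h1, h2]

lemma pvLevelRun (m : List (List Int)) : ∀ (F acc : List (Int × Int)) C s fB,
    pvBfsLevels m fB F acc C s =
      match pvProcess m F acc C with
      | none => some (s + 1)
      | some (acc', C') => pvBfsLevels m fB [] acc' C' s := by
  intro F
  induction F with
  | nil => intro acc C s fB; simp [pvProcess]
  | cons v rest ih =>
    intro acc C s fB
    obtain ⟨x, y⟩ := v
    by_cases h1 : (x, y) ∈ C
    · rw [show pvProcess m ((x, y) :: rest) acc C = pvProcess m rest acc C by
          simp [pvProcess, h1],
        show pvBfsLevels m fB ((x, y) :: rest) acc C s = pvBfsLevels m fB rest acc C s by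
          simp [pvBfsLevels, h1]]
      exact ih acc C s fB
    · by_cases h2 : pvOpenB m (x, y) = true
      · by_cases h3 : (y == (m.headI.length : Int) - 1) = true
        · rw [show pvProcess m ((x, y) :: rest) acc C = none by simp [pvProcess, h1, h2, h3],
            show pvBfsLevels m fB ((x, y) :: rest) acc C s = some (s + 1) by
              simp [pvBfsLevels, h1, h2, h3]]
        · rw [show pvProcess m ((x, y) :: rest) acc C
              = pvProcess m rest (acc ++ pvNbrs (x, y)) (C.add (x, y)) by
                simp [pvProcess, h1, h2, h3],
            show pvBfsLevels m fB ((x, y) :: rest) acc C s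
              = pvBfsLevels m fB rest (acc ++ pvNbrs (x, y)) (C.add (x, y)) s by
                simp [pvBfsLevels, h1, h2, h3, pvNbrs]]
          exact ih _ _ s fB
      · rw [show pvProcess m ((x, y) :: rest) acc C = pvProcess m rest acc C by
            simp [pvProcess, h1, h2],
          show pvBfsLevels m fB ((x, y) :: rest) acc C s = pvBfsLevels m fB rest acc C s by
            simp [pvBfsLevels, h1, h2]]
        exact ih acc C s fB

lemma pvProcess_none_iff (m : List (List Int)) : ∀ (F acc : List (Int × Int)) C,
    (∀ v ∈ C, v.2 ≠ (m.headI.length : Int) - 1) →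
    (pvProcess m F acc C = none ↔ ∃ v ∈ F, pvOpenB m v = true ∧ v.2 = (m.headI.length : Int) - 1) := by
  intro F
  induction F with
  | nil => intro acc C h; simp [pvProcess]
  | cons v rest ih =>
    intro acc C h
    by_cases h1 : v ∈ C
    · have hvt := h v h1
      rw [show pvProcess m (v :: rest) acc C = pvProcess m rest acc C by simp [pvProcess, h1],
        ih acc C h]
      constructor
      · rintro ⟨w, hw, hh⟩; exact ⟨w, List.mem_cons_of_mem _ hw, hh⟩
      · rintro ⟨w, hw, ho, ht⟩
        rcases List.mem_cons.1 hw with rfl | hw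
        · exact absurd ht hvt
        · exact ⟨w, hw, ho, ht⟩
    · by_cases h2 : pvOpenB m v = true
      · by_cases h3 : (v.2 == (m.headI.length : Int) - 1) = true
        · rw [show pvProcess m (v :: rest) acc C = none by simp [pvProcess, h1, h2, h3]]
          simp only [true_iff]
          exact ⟨v, List.mem_cons_self, h2, by simpa using h3⟩
        · have h' : ∀ w ∈ C.add v, w.2 ≠ (m.headI.length : Int) - 1 := by
            intro w hw
            rcases (PySem.Set.mem_add _ _ _).1 hw with hw' | rfl
            · exact h w hw'
            · simpa using h3
          rw [show pvProcess m (v :: rest) acc C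
              = pvProcess m rest (acc ++ pvNbrs v) (C.add v) by simp [pvProcess, h1, h2, h3],
            ih _ _ h']
          constructor
          · rintro ⟨w, hw, hh⟩; exact ⟨w, List.mem_cons_of_mem _ hw, hh⟩
          · rintro ⟨w, hw, ho, ht⟩
            rcases List.mem_cons.1 hw with rfl | hw
            · exact absurd ht (by simpa using h3)
            · exact ⟨w, hw, ho, ht⟩
      · rw [show pvProcess m (v :: rest) acc C = pvProcess m rest acc C by simp [pvProcess, h1, h2],
          ih acc C h]
        constructor
        · rintro ⟨w, hw, hh⟩; exact ⟨w, List.mem_cons_of_mem _ hw, hh⟩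
        · rintro ⟨w, hw, ho, ht⟩
          rcases List.mem_cons.1 hw with rfl | hw
          · exact absurd ho (by simpa using h2)
          · exact ⟨w, hw, ho, ht⟩

lemma pvProcess_some (m : List (List Int)) : ∀ (F acc : List (Int × Int)) C acc' C',
    pvProcess m F acc C = some (acc', C') →
    (∀ w, w ∈ C' ↔ (w ∈ C ∨
        (w ∈ F ∧ pvOpenB m w = true ∧ w.2 ≠ (m.headI.length : Int) - 1))) ∧
    (∀ w, w ∈ acc' ↔ (w ∈ acc ∨ ∃ v, v ∈ F ∧ pvOpenB m v = true ∧
        v.2 ≠ (m.headI.length : Int) - 1 ∧ v ∉ C ∧ w ∈ pvNbrs v)) := by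
  intro F
  induction F with
  | nil =>
    intro acc C acc' C' hp
    simp only [pvProcess, Option.some.injEq, Prod.mk.injEq] at hp
    obtain ⟨rfl, rfl⟩ := hp
    constructor
    · intro w; simp
    · intro w; simp
  | cons v rest ih =>
    intro acc C acc' C' hp
    by_cases h1 : v ∈ C
    · rw [show pvProcess m (v :: rest) acc C = pvProcess m rest acc C by simp [pvProcess, h1]] at hp
      obtain ⟨hC, hacc⟩ := ih acc C acc' C' hp
      constructor
      · intro w
        rw [hC w]
        constructor
        · rintro (h | ⟨hw, hrest⟩)
          · exact Or.inl h
          · exact Or.inr ⟨List.mem_cons_of_mem _ hw, hrest⟩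
        · rintro (h | ⟨hw, hrest⟩)
          · exact Or.inl h
          · rcases List.mem_cons.1 hw with rfl | hw
            · exact Or.inl h1
            · exact Or.inr ⟨hw, hrest⟩
      · intro w
        rw [hacc w]
        constructor
        · rintro (h | ⟨u, hu, hrest⟩)
          · exact Or.inl h
          · exact Or.inr ⟨u, List.mem_cons_of_mem _ hu, hrest⟩
        · rintro (h | ⟨u, hu, ho, ht, hc, hn⟩)
          · exact Or.inl h
          · rcases List.mem_cons.1 hu with rfl | hu
            · exact absurd h1 hc
            · exact Or.inr ⟨u, hu, ho, ht, hc, hn⟩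
    · by_cases h2 : pvOpenB m v = true
      · by_cases h3 : (v.2 == (m.headI.length : Int) - 1) = true
        · rw [show pvProcess m (v :: rest) acc C = none by simp [pvProcess, h1, h2, h3]] at hp
          exact absurd hp (by simp)
        · have h3' : v.2 ≠ (m.headI.length : Int) - 1 := by simpa using h3
          rw [show pvProcess m (v :: rest) acc C
              = pvProcess m rest (acc ++ pvNbrs v) (C.add v) by simp [pvProcess, h1, h2, h3]] at hp
          obtain ⟨hC, hacc⟩ := ih _ _ acc' C' hp
          constructor
          · intro w
            rw [hC w]
            constructor
            · rintro (h | ⟨hw, hrest⟩)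
              · rcases (PySem.Set.mem_add _ _ _).1 h with h | rfl
                · exact Or.inl h
                · exact Or.inr ⟨List.mem_cons_self, h2, h3'⟩
              · exact Or.inr ⟨List.mem_cons_of_mem _ hw, hrest⟩
            · rintro (h | ⟨hw, hrest⟩)
              · exact Or.inl ((PySem.Set.mem_add _ _ _).2 (Or.inl h))
              · rcases List.mem_cons.1 hw with rfl | hw
                · exact Or.inl ((PySem.Set.mem_add _ _ _).2 (Or.inr rfl))
                · exact Or.inr ⟨hw, hrest⟩
          · intro w
            rw [hacc w]
            constructor
            · rintro (h | ⟨u, hu, ho, ht, hc, hn⟩)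
              · rcases List.mem_append.1 h with h | h
                · exact Or.inl h
                · exact Or.inr ⟨v, List.mem_cons_self, h2, h3', h1, h⟩
              · refine Or.inr ⟨u, List.mem_cons_of_mem _ hu, ho, ht, ?_, hn⟩
                intro hcu
                exact hc ((PySem.Set.mem_add _ _ _).2 (Or.inl hcu))
            · rintro (h | ⟨u, hu, ho, ht, hc, hn⟩)
              · exact Or.inl (List.mem_append.2 (Or.inl h))
              · rcases List.mem_cons.1 hu with rfl | hu
                · exact Or.inl (List.mem_append.2 (Or.inr hn))
                · by_cases huv : u = v
                  · subst huv; exact Or.inl (List.mem_append.2 (Or.inr hn))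
                  · refine Or.inr ⟨u, hu, ho, ht, ?_, hn⟩
                    intro hadd
                    rcases (PySem.Set.mem_add _ _ _).1 hadd with h | rfl
                    · exact hc h
                    · exact huv rfl
      · rw [show pvProcess m (v :: rest) acc C = pvProcess m rest acc C by
            simp [pvProcess, h1, h2]] at hp
        obtain ⟨hC, hacc⟩ := ih acc C acc' C' hp
        constructor
        · intro w
          rw [hC w]
          constructor
          · rintro (h | ⟨hw, hrest⟩)
            · exact Or.inl h
            · exact Or.inr ⟨List.mem_cons_of_mem _ hw, hrest⟩
          · rintro (h | ⟨hw, hrest⟩)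
            · exact Or.inl h
            · rcases List.mem_cons.1 hw with rfl | hw
              · exact absurd hrest.1 (by simpa using h2)
              · exact Or.inr ⟨hw, hrest⟩
        · intro w
          rw [hacc w]
          constructor
          · rintro (h | ⟨u, hu, hrest⟩)
            · exact Or.inl h
            · exact Or.inr ⟨u, List.mem_cons_of_mem _ hu, hrest⟩
          · rintro (h | ⟨u, hu, ho, ht, hc, hn⟩)
            · exact Or.inl h
            · rcases List.mem_cons.1 hu with rfl | hu
              · exact absurd ho (by simpa using h2)
              · exact Or.inr ⟨u, hu, ho, ht, hc, hn⟩

lemma pvReach_nil (m : List (List Int)) : ∀ n v, ¬ pvReach m [] n v := by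
  intro n
  induction n with
  | zero => intro v; simp [pvReach]
  | succ n ih => rintro v ⟨u, hu, -⟩; exact ih u hu

lemma pvReach_append (m : List (List Int)) (S T : List (Int × Int)) :
    ∀ n v, pvReach m (S ++ T) n v ↔ pvReach m S n v ∨ pvReach m T n v := by
  intro n
  induction n with
  | zero => intro v; simp [pvReach]
  | succ n ih =>
    intro v
    simp only [pvReach]
    constructor
    · rintro ⟨u, hu, ho, ht, hn⟩
      rcases (ih u).1 hu with h | h
      · exact Or.inl ⟨u, h, ho, ht, hn⟩
      · exact Or.inr ⟨u, h, ho, ht, hn⟩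
    · rintro (⟨u, h, ho, ht, hn⟩ | ⟨u, h, ho, ht, hn⟩)
      · exact ⟨u, (ih u).2 (Or.inl h), ho, ht, hn⟩
      · exact ⟨u, (ih u).2 (Or.inr h), ho, ht, hn⟩

lemma pvAnswer_unique (m : List (List Int)) (S : List (Int × Int)) (r r' : Option Nat)
    (h : pvAnswer m S r) (h' : pvAnswer m S r') : r = r' := by
  rcases h with ⟨rfl, hno⟩ | ⟨N, rfl, hhit, hleast⟩
  · rcases h' with ⟨rfl, -⟩ | ⟨N', rfl, hhit', -⟩
    · rfl
    · exact absurd hhit' (hno N')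
  · rcases h' with ⟨rfl, hno'⟩ | ⟨N', rfl, hhit', hleast'⟩
    · exact absurd hhit (hno' N)
    · have : N = N' := by
        by_contra hne
        rcases Nat.lt_or_ge N N' with h | h
        · exact hleast' N h hhit
        · exact hleast N' (by omega) hhit'
      rw [this]

lemma pvOptMin_answer (m : List (List Int)) (S T : List (Int × Int)) (a b : Option Nat)
    (ha : pvAnswer m S a) (hb : pvAnswer m T b) : pvAnswer m (S ++ T) (pvOptMin a b) := by
  have hitIff : ∀ k, pvHit m (S ++ T) k ↔ pvHit m S k ∨ pvHit m T k := by
    intro k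
    unfold pvHit
    constructor
    · rintro ⟨v, hr, ho, ht⟩
      rcases (pvReach_append m S T k v).1 hr with h | h
      · exact Or.inl ⟨v, h, ho, ht⟩
      · exact Or.inr ⟨v, h, ho, ht⟩
    · rintro (⟨v, h, ho, ht⟩ | ⟨v, h, ho, ht⟩)
      · exact ⟨v, (pvReach_append m S T k v).2 (Or.inl h), ho, ht⟩
      · exact ⟨v, (pvReach_append m S T k v).2 (Or.inr h), ho, ht⟩
  rcases ha with ⟨rfl, hnoa⟩ | ⟨N, rfl, hhita, hlista⟩
  · rcases hb with ⟨rfl, hnob⟩ | ⟨N', rfl, hhitb, hlistb⟩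
    · refine Or.inl ⟨rfl, fun k hk => ?_⟩
      rcases (hitIff k).1 hk with h | h
      · exact hnoa k h
      · exact hnob k h
    · refine Or.inr ⟨N', rfl, (hitIff N').2 (Or.inr hhitb), fun k hk hhit => ?_⟩
      rcases (hitIff k).1 hhit with h | h
      · exact hnoa k h
      · exact hlistb k hk h
  · rcases hb with ⟨rfl, hnob⟩ | ⟨N', rfl, hhitb, hlistb⟩
    · refine Or.inr ⟨N, rfl, (hitIff N).2 (Or.inl hhita), fun k hk hhit => ?_⟩
      rcases (hitIff k).1 hhit with h | h
      · exact hlista k hk h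
      · exact hnob k h
    · refine Or.inr ⟨min N N', by simp [pvOptMin, Nat.succ_min_succ], ?_, fun k hk hhit => ?_⟩
      · rcases Nat.le_total N N' with h | h
        · rw [Nat.min_eq_left h]; exact (hitIff N).2 (Or.inl hhita)
        · rw [Nat.min_eq_right h]; exact (hitIff N').2 (Or.inr hhitb)
      · rcases (hitIff k).1 hhit with h | h
        · exact hlista k (by omega) h
        · exact hlistb k (by omega) h

-- main invariant argument: a frontier run from an invariant-satisfying state computes the distance
lemma pvLevels_correct (m : List (List Int)) (S : List (Int × Int)) :
    ∀ fB n (F : List (Int × Int)) (C : PySem.Set (Int × Int)),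
    (∀ v, v ∈ C ↔ (pvOpenB m v = true ∧ v.2 ≠ (m.headI.length : Int) - 1 ∧
        ∃ k < n, pvReach m S k v)) →
    (∀ v, pvReach m S n v → v ∈ F ∨ ∃ k < n, pvReach m S k v) →
    (∀ v ∈ F, ∃ k ≤ n, pvReach m S k v) →
    (∀ k < n, ¬ pvHit m S k) →
    pvFree m C + 2 ≤ fB →
    pvAnswer m S (pvBfsLevels m fB F [] C n) := by
  intro fB
  induction fB with
  | zero => intro n F C hi hii hiii hiv hfuel; omega
  | succ fB ih =>
    intro n F C hi hii hiii hiv hfuel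
    rw [pvLevelRun]
    have hCt : ∀ v ∈ C, v.2 ≠ (m.headI.length : Int) - 1 := fun v hv => ((hi v).1 hv).2.1
    cases hproc : pvProcess m F [] C with
    | none =>
      obtain ⟨v, hvF, hvo, hvt⟩ := (pvProcess_none_iff m F [] C hCt).1 hproc
      obtain ⟨k, hk, hr⟩ := hiii v hvF
      have hkn : k = n := by
        rcases Nat.lt_or_ge k n with h | h
        · exact absurd ⟨v, hr, hvo, hvt⟩ (hiv k h)
        · omega
      rw [hkn] at hr
      show pvAnswer m S (some (n + 1))
      exact Or.inr ⟨n, rfl, ⟨v, hr, hvo, hvt⟩, hiv⟩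
    | some p =>
      obtain ⟨acc', C'⟩ := p
      show pvAnswer m S (pvBfsLevels m (fB + 1) [] acc' C' n)
      obtain ⟨hC, hacc⟩ := pvProcess_some m F [] C acc' C' hproc
      have hnohitn : ¬ pvHit m S n := by
        rintro ⟨v, hr, ho, ht⟩
        rcases hii v hr with hvF | ⟨k, hk, hr'⟩
        · have hnone : pvProcess m F [] C = none :=
            (pvProcess_none_iff m F [] C hCt).2 ⟨v, hvF, ho, ht⟩
          rw [hproc] at hnone
          exact absurd hnone (by simp)
        · exact hiv k hk ⟨v, hr', ho, ht⟩
      have hiv' : ∀ k < n + 1, ¬ pvHit m S k := by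
        intro k hk
        rcases Nat.lt_or_ge k n with h | h
        · exact hiv k h
        · have : k = n := by omega
          subst this
          exact hnohitn
      by_cases hacc'e : acc' = []
      · subst hacc'e
        rw [show pvBfsLevels m (fB + 1) [] [] C' n = none by simp [pvBfsLevels]]
        refine Or.inl ⟨rfl, ?_⟩
        have hcol : ∀ v, pvReach m S (n + 1) v → ∃ k ≤ n, pvReach m S k v := by
          rintro v ⟨u, hu, ho, ht, hn⟩
          rcases hii u hu with huF | ⟨k, hk, hr'⟩
          · by_cases hc : u ∈ C
            · obtain ⟨-, -, k, hk, hr'⟩ := (hi u).1 hc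
              exact ⟨k + 1, by omega, ⟨u, hr', ho, ht, hn⟩⟩
            · exact absurd ((hacc v).2 (Or.inr ⟨u, huF, ho, ht, hc, hn⟩)) (by simp)
          · exact ⟨k + 1, by omega, ⟨u, hr', ho, ht, hn⟩⟩
        have hclaim : ∀ j v, pvReach m S (n + 1 + j) v → ∃ k ≤ n, pvReach m S k v := by
          intro j
          induction j with
          | zero => exact hcol
          | succ j ihj =>
            rintro v ⟨u, hu, ho, ht, hn⟩
            obtain ⟨k, hk, hr'⟩ := ihj u hu
            rcases Nat.lt_or_ge k n with h | h
            · exact ⟨k + 1, by omega, ⟨u, hr', ho, ht, hn⟩⟩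
            · have : k = n := by omega
              subst this
              exact hcol v ⟨u, hr', ho, ht, hn⟩
        rintro k ⟨v, hr, ho, ht⟩
        rcases Nat.lt_or_ge k (n + 1) with h | h
        · exact hiv' k h ⟨v, hr, ho, ht⟩
        · rw [show k = n + 1 + (k - (n + 1)) by omega] at hr
          obtain ⟨k', hk', hr'⟩ := hclaim (k - (n + 1)) v hr
          exact hiv' k' (by omega) ⟨v, hr', ho, ht⟩
      · obtain ⟨a, t, rfl⟩ := List.exists_cons_of_ne_nil hacc'e
        rw [show pvBfsLevels m (fB + 1) [] (a :: t) C' n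
            = pvBfsLevels m fB (a :: t) [] C' (n + 1) by simp [pvBfsLevels]]
        have hfree : pvFree m C' < pvFree m C := by
          have hmem := (hacc a).1 List.mem_cons_self
          rcases hmem with h | ⟨u, huF, ho, ht, hc, -⟩
          · exact absurd h (by simp)
          · exact pvFree_lt m C C' (fun w hw => (hC w).2 (Or.inl hw)) u
              (pvOpen_mem_cells m u ho) hc ((hC u).2 (Or.inr ⟨huF, ho, ht⟩))
        apply ih (n + 1) (a :: t) C'
        · intro v
          rw [hC v]
          constructor
          · rintro (h | ⟨hvF, ho, ht⟩)
            · obtain ⟨ho, ht, k, hk, hr⟩ := (hi v).1 h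
              exact ⟨ho, ht, k, by omega, hr⟩
            · obtain ⟨k, hk, hr⟩ := hiii v hvF
              exact ⟨ho, ht, k, by omega, hr⟩
          · rintro ⟨ho, ht, k, hk, hr⟩
            rcases Nat.lt_or_ge k n with h | h
            · exact Or.inl ((hi v).2 ⟨ho, ht, k, h, hr⟩)
            · have : k = n := by omega
              subst this
              rcases hii v hr with hvF | ⟨k', hk', hr'⟩
              · exact Or.inr ⟨hvF, ho, ht⟩
              · exact Or.inl ((hi v).2 ⟨ho, ht, k', hk', hr'⟩)
        · rintro v ⟨u, hu, ho, ht, hn⟩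
          rcases hii u hu with huF | ⟨k, hk, hr'⟩
          · by_cases hc : u ∈ C
            · obtain ⟨-, -, k, hk, hr'⟩ := (hi u).1 hc
              exact Or.inr ⟨k + 1, by omega, ⟨u, hr', ho, ht, hn⟩⟩
            · exact Or.inl ((hacc v).2 (Or.inr ⟨u, huF, ho, ht, hc, hn⟩))
          · exact Or.inr ⟨k + 1, by omega, ⟨u, hr', ho, ht, hn⟩⟩
        · intro v hv
          rcases (hacc v).1 hv with h | ⟨u, huF, ho, ht, hc, hn⟩
          · exact absurd h (by simp)
          · obtain ⟨k, hk, hr⟩ := hiii u huF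
            exact ⟨k + 1, by omega, ⟨u, hr, ho, ht, hn⟩⟩
        · exact hiv'
        · omega

lemma pvPerSource (m : List (List Int)) (v : Int × Int) :
    pvAnswer m [v] (pvBfsAux m (4 * m.length * m.headI.length + 3) [(v.1, v.2, 0)] PySem.Set.empty) := by
  have hinit : ∀ w ∈ (PySem.Set.empty : PySem.Set (Int × Int)), False := by
    intro w hw
    simp [PySem.Set.empty] at hw
  have hsim := pvSim m ((4 * m.length * m.headI.length + 3) + (m.length * m.headI.length + 2))
    (4 * m.length * m.headI.length + 3) (m.length * m.headI.length + 2)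
    [v] [] PySem.Set.empty 0 (le_refl _)
    (by rw [pvFree_empty, Nat.mul_assoc]; simp; omega)
    (by rw [pvFree_empty]; simp)
  rw [show ([v].map (fun w => (w.1, w.2, 0)) ++ ([] : List (Int × Int)).map (fun w => (w.1, w.2, 0 + 1)))
      = [(v.1, v.2, 0)] by simp] at hsim
  rw [hsim]
  apply pvLevels_correct m [v] (m.length * m.headI.length + 2) 0 [v] PySem.Set.empty
  · intro w
    constructor
    · intro hw; exact absurd hw (fun h => hinit w h)
    · rintro ⟨-, -, k, hk, -⟩; omega
  · exact fun w hw => Or.inl hw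
  · exact fun w hw => ⟨0, Nat.le_refl 0, hw⟩
  · intro k hk; exact absurd hk (Nat.not_lt_zero k)
  · rw [pvFree_empty]

lemma pvFold_answer (m : List (List Int)) : ∀ (L : List Nat) (acc : Option Nat) (S₀ : List (Int × Int)),
    pvAnswer m S₀ acc →
    pvAnswer m (S₀ ++ L.filterMap (fun i => if (m.getD i []).headI == 1 then some ((i : Int), (0 : Int)) else none))
      (L.foldl (fun acc i =>
        if (m.getD i []).headI == 1 then
          pvOptMin acc (pvBfsAux m (4 * m.length * m.headI.length + 3)
            [((i : Int), (0 : Int), 0)] PySem.Set.empty)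
        else acc) acc) := by
  intro L
  induction L with
  | nil => intro acc S₀ hacc0; simpa using hacc0
  | cons i L ih =>
    intro acc S₀ hacc0
    simp only [List.foldl_cons, List.filterMap_cons]
    by_cases hcond : ((m.getD i []).headI == 1) = true
    · rw [if_pos hcond, if_pos hcond]
      have h1 : pvAnswer m (S₀ ++ [((i : Int), (0 : Int))])
          (pvOptMin acc (pvBfsAux m (4 * m.length * m.headI.length + 3)
            [((i : Int), (0 : Int), 0)] PySem.Set.empty)) :=
        pvOptMin_answer m S₀ [((i : Int), (0 : Int))] acc _ hacc0
          (pvPerSource m ((i : Int), (0 : Int)))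
      have h2 := ih _ _ h1
      simpa [List.append_assoc] using h2
    · rw [if_neg hcond, if_neg hcond]
      exact ih acc S₀ hacc0

-- ===== VERDICT (by name: the statement is the Claim_ definition above) =====
theorem safest_way_spec : Claim_equal_safest_way := by
  intro matrix hdom hpre
  show safest_way matrix = safest_way_alt matrix
  unfold safest_way safest_way_alt
  by_cases htriv : matrix = [] ∨ matrix.headI = []
  · rw [if_pos htriv, if_pos htriv]
  · rw [if_neg htriv, if_neg htriv]
    show (match (List.range matrix.length).foldl
      (fun acc i =>
        if (matrix.getD i []).headI == 1 then
          pvOptMin acc (pvBfsAux matrix (4 * matrix.length * matrix.headI.length + 3)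
            [((i : Int), (0 : Int), 0)] PySem.Set.empty)
        else acc) none with
      | none => (-1 : Int)
      | some s => (s : Int)) =
      (match pvBfsLevels matrix (matrix.length * matrix.headI.length + 2)
        ((List.range matrix.length).filterMap
          (fun i => if (matrix.getD i []).headI == 1 then some ((i : Int), (0 : Int)) else none))
        [] PySem.Set.empty 0 with
      | none => (-1 : Int)
      | some s => (s : Int))
    have hnil : pvAnswer matrix ([] : List (Int × Int)) none := by
      refine Or.inl ⟨rfl, ?_⟩
      rintro k ⟨v, hr, -, -⟩
      exact pvReach_nil matrix k v hr
    have h1 := pvFold_answer matrix (List.range matrix.length) none [] hnil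
    rw [List.nil_append] at h1
    have h2 : pvAnswer matrix
        ((List.range matrix.length).filterMap
          (fun i => if (matrix.getD i []).headI == 1 then some ((i : Int), (0 : Int)) else none))
        (pvBfsLevels matrix (matrix.length * matrix.headI.length + 2)
          ((List.range matrix.length).filterMap
            (fun i => if (matrix.getD i []).headI == 1 then some ((i : Int), (0 : Int)) else none))
          [] PySem.Set.empty 0) := by
      apply pvLevels_correct
      · intro w
        constructor
        · intro hw; simp [PySem.Set.empty] at hw
        · rintro ⟨-, -, k, hk, -⟩; omega
      · exact fun w hw => Or.inl hw
      · exact fun w hw => ⟨0, Nat.le_refl 0, hw⟩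
      · intro k hk; exact absurd hk (Nat.not_lt_zero k)
      · rw [pvFree_empty]
    rw [pvAnswer_unique matrix _ _ _ h1 h2]
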